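-- pv_equiv track=rewrite | github.com/Nomoos/PrismQ | scripts/add_module.py | derive_module_path
-- ===== SOURCE A (Python) =====
-- from typing import Optional, Tuple, List
--
-- def derive_module_path(repo_name: str) -> Tuple[str, str]:
--     """
--     Derive module path from repository name.
--
--     Converts repository name like "PrismQ.IdeaInspiration.Sources"
--     to module name "IdeaInspiration.Sources" and path "src/IdeaInspiration/src/Sources"
--     """
--     # Remove "PrismQ." prefix if present
--     module_full_name = repo_name.replace('PrismQ.', '', 1)
--
--     # Split by dots
--     components = module_full_name.split('.')
--
--     if len(components) == 1:
--         # Single component: src/Component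
--         return components[0], f"src/{components[0]}"
--     else:
--         # Multiple components: src/First/src/Second/src/Third...
--         path_parts = [f"src/{components[0]}"]
--         for component in components[1:]:
--             path_parts.append(f"src/{component}")
--         module_path = '/'.join(path_parts)
--         return module_full_name, module_path
-- ===== SOURCE B (Python) =====
-- def derive_module_path(repo_name: str):
--     module_full_name = repo_name.replace('PrismQ.', '', 1)
--     return module_full_name, 'src/' + module_full_name.replace('.', '/src/')
-- ===== Notes on version B (the rewrite author's own statement) =====
-- stated objective: idiomatic
-- what changed: B drops A's split-into-components, the explicit append loop over components[1:], the '/'.join and the single-component branch, and computes the path in closed form as 'src/' + module_full_name.replace('.', '/src/').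
import Mathlib
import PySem

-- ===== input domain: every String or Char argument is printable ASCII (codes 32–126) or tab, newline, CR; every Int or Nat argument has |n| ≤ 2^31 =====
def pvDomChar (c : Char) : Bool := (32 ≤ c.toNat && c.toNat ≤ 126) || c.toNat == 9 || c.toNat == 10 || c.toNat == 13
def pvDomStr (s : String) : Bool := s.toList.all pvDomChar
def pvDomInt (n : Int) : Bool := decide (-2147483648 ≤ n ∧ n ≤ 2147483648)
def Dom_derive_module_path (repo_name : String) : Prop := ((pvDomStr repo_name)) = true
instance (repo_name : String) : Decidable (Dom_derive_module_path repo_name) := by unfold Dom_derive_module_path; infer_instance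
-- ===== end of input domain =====

-- B replaces A's split-into-components / loop / join / single-component branch by the
-- closed form "src/" + module_full_name.replace(".", "/src/") (idiomatic; same value).

-- ===== PORT A =====
-- Python's s.replace(old, new, 1) for a NON-empty old (exact there: rewrites the first
-- occurrence of old, or leaves s unchanged); PySem has no count-limited replace.
-- Both Pythons call replace('PrismQ.', '', 1), so the helper is shared.
def replaceFirst (old new : List Char) : List Char → List Char
  | [] => []
  | c :: t =>
      if old.isPrefixOf (c :: t) then new ++ (c :: t).drop old.length
      else c :: replaceFirst old new t

def derive_module_path (repo_name : String) : String × String :=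
  -- module_full_name = repo_name.replace('PrismQ.', '', 1)
  let mfn : List Char := replaceFirst "PrismQ.".toList [] repo_name.toList
  -- components = module_full_name.split('.')
  let components := PySem.Chars.splitOn mfn ['.']
  if components.length = 1 then
    -- components[0]: str.split never returns an empty list, so index 0 is in range (headD is exact here)
    (String.ofList (components.headD []), String.ofList ("src/".toList ++ components.headD []))
  else
    -- path_parts = [f"src/{components[0]}"]; for component in components[1:]: path_parts.append(f"src/{component}")
    let path_parts := components.tail.foldl
      (fun acc comp => acc ++ ["src/".toList ++ comp])
      ["src/".toList ++ components.headD []]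
    -- module_path = '/'.join(path_parts)
    (String.ofList mfn, String.ofList (PySem.Chars.join ['/'] path_parts))

-- ===== PORT B =====
def derive_module_path_alt (repo_name : String) : String × String :=
  -- module_full_name = repo_name.replace('PrismQ.', '', 1)
  let mfn : List Char := replaceFirst "PrismQ.".toList [] repo_name.toList
  -- return module_full_name, 'src/' + module_full_name.replace('.', '/src/')
  (String.ofList mfn, String.ofList ("src/".toList ++ PySem.Chars.replace mfn ['.'] "/src/".toList))

-- ===== PRECONDITION & SPEC =====
def Spec_derive_module_path (repo_name : String) (out : String × String) : Prop := out = derive_module_path_alt repo_name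
instance (repo_name : String) (out : String × String) : Decidable (Spec_derive_module_path repo_name out) := by unfold Spec_derive_module_path; infer_instance

-- ===== CLAIM (what is proved, stated in full; the proofs are below) =====
def Claim_equal_derive_module_path : Prop := ∀ (repo_name : String), Dom_derive_module_path repo_name → Spec_derive_module_path repo_name (derive_module_path repo_name)

-- ===== LEMMAS AND PROOFS =====

-- str.replace with a single-character pattern is a flatMap over the characters
lemma replace_go_single (d : Char) (new : List Char) (l : List Char) :
    ∀ (fuel : Nat) (acc : List Char), l.length ≤ fuel →
    PySem.Chars.replace.go [d] new fuel l acc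
      = acc.reverse ++ l.flatMap (fun c => if c = d then new else [c]) := by
  induction l with
  | nil =>
    intro fuel acc _
    cases fuel <;> simp [PySem.Chars.replace.go]
  | cons c t ih =>
    intro fuel acc hle
    cases fuel with
    | zero => simp at hle
    | succ n =>
      simp only [PySem.Chars.replace.go]
      by_cases hc : c = d
      · subst hc
        simp only [List.isPrefixOf, BEq.rfl, Bool.true_and, if_true]
        rw [show List.drop [c].length (c :: t) = t by simp]
        rw [ih n (new.reverse ++ acc) (by simpa using Nat.le_of_succ_le_succ hle)]
        simp
      · have : List.isPrefixOf [d] (c :: t) = false := by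
          simp [List.isPrefixOf]; exact fun h => absurd h.symm hc
        rw [this]
        simp only [if_false, Bool.false_eq_true]
        rw [ih n (c :: acc) (by simpa using Nat.le_of_succ_le_succ hle)]
        simp [hc]

lemma replace_single (d : Char) (new s : List Char) :
    PySem.Chars.replace s [d] new = s.flatMap (fun c => if c = d then new else [c]) := by
  rw [PySem.Chars.replace]
  simp only [List.isEmpty_cons, Bool.false_eq_true, if_false]
  exact replace_go_single d new s s.length [] le_rfl

-- reference splitter: Python str.split(d) for a single-character separator d
def split1 (d : Char) : List Char → List (List Char)
  | [] => [[]]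
  | c :: t =>
      if c = d then [] :: split1 d t
      else
        match split1 d t with
        | p :: ps => (c :: p) :: ps
        | [] => [[c]]

lemma split1_ne_nil (d : Char) (l : List Char) : split1 d l ≠ [] := by
  induction l with
  | nil => simp [split1]
  | cons c t ih =>
    simp only [split1]
    split_ifs
    · simp
    · rcases h : split1 d t with _ | ⟨p, ps⟩ <;> simp

def modHead (pre : List Char) : List (List Char) → List (List Char)
  | [] => [pre]
  | p :: ps => (pre ++ p) :: ps

lemma splitOn_go_eq (d : Char) (l : List Char) : ∀ (fuel : Nat) (cur : List Char) (acc : List (List Char)), l.length ≤ fuel →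
    PySem.Chars.splitOn.go [d] fuel l cur acc = acc.reverse ++ modHead cur.reverse (split1 d l) := by
  induction l with
  | nil =>
    intro fuel cur acc _
    cases fuel <;> simp [PySem.Chars.splitOn.go, modHead, split1]
  | cons c t ih =>
    intro fuel cur acc hle
    cases fuel with
    | zero => simp at hle
    | succ n =>
      simp only [PySem.Chars.splitOn.go]
      rcases hsp : split1 d t with _ | ⟨p, ps⟩
      · exact absurd hsp (split1_ne_nil d t)
      by_cases hc : c = d
      · subst hc
        simp only [List.isPrefixOf, BEq.rfl, Bool.true_and, if_true]
        rw [show List.drop [c].length (c :: t) = t by simp]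
        rw [ih n [] (cur.reverse :: acc) (by simpa using Nat.le_of_succ_le_succ hle)]
        simp [split1, modHead, hsp]
      · have hpre : List.isPrefixOf [d] (c :: t) = false := by
          simp [List.isPrefixOf]; exact fun h => absurd h.symm hc
        rw [hpre]
        simp only [if_false, Bool.false_eq_true]
        rw [ih n (c :: cur) acc (by simpa using Nat.le_of_succ_le_succ hle)]
        simp [split1, modHead, hsp, hc]

lemma splitOn_single (d : Char) (l : List Char) :
    PySem.Chars.splitOn l [d] = split1 d l := by
  rw [PySem.Chars.splitOn, splitOn_go_eq d l (l.length + 1) [] [] (by omega)]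
  rcases h : split1 d l with _ | ⟨p, ps⟩
  · exact absurd h (split1_ne_nil d l)
  · simp [modHead]

lemma split1_singleton (d : Char) (l p : List Char) (h : split1 d l = [p]) : p = l := by
  induction l generalizing p with
  | nil => simp [split1] at h; exact h
  | cons c t ih =>
    simp only [split1] at h
    split_ifs at h with hc
    · simp at h
      exact absurd h.2 (split1_ne_nil d t)
    · rcases h' : split1 d t with _ | ⟨q, qs⟩
      · exact absurd h' (split1_ne_nil d t)
      · rw [h'] at h
        simp at h
        obtain ⟨h1, h2⟩ := h
        rw [← h1, ih q (by rw [h', h2])]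

-- A's append loop builds exactly the mapped list
lemma foldl_append_map {α β : Type} (g : α → β) (l : List α) : ∀ (init : List β),
    l.foldl (fun acc x => acc ++ [g x]) init = init ++ l.map g := by
  induction l with
  | nil => intro init; simp
  | cons x xs ih => intro init; simp [List.foldl_cons, ih]

lemma intercalate_cons {α : Type} (sep a : List α) (L : List (List α)) :
    List.intercalate sep (a :: L) = a ++ (if L.isEmpty then [] else sep ++ List.intercalate sep L) := by
  cases L <;> simp [List.intercalate, List.intersperse]

-- the core identity: '/'-joining the "src/"-prefixed dot-components equals the closed form
lemma main_path (s : List Char) :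
    List.intercalate ['/'] ((split1 '.' s).map (fun p => "src/".toList ++ p))
      = "src/".toList ++ s.flatMap (fun c => if c = '.' then "/src/".toList else [c]) := by
  induction s with
  | nil => simp [split1, List.intercalate]
  | cons c t ih =>
    rcases h : split1 '.' t with _ | ⟨p, ps⟩
    · exact absurd h (split1_ne_nil '.' t)
    by_cases hc : c = '.'
    · subst hc
      rw [h] at ih
      simp only [List.map_cons] at ih
      simp only [split1, h]
      norm_num
      rw [intercalate_cons]
      simp only [List.isEmpty_cons, Bool.false_eq_true, if_false, ih]
      simp
    · simp only [split1, hc, if_false, h, List.map_cons]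
      rw [h] at ih
      rw [intercalate_cons]
      rw [List.map_cons, intercalate_cons] at ih
      simp only [List.flatMap_cons, hc, if_false]
      have key : p ++ (if (ps.map (fun p => "src/".toList ++ p)).isEmpty then [] else ['/'] ++ List.intercalate ['/'] (ps.map (fun p => "src/".toList ++ p)))
          = t.flatMap (fun c => if c = '.' then "/src/".toList else [c]) := by
        have := ih
        rw [List.append_assoc] at this
        exact List.append_cancel_left this
      rw [List.append_assoc, ← key]
      simp

-- ===== VERDICT (by name: the statement is the Claim_ definition above) =====
theorem derive_module_path_spec : Claim_equal_derive_module_path := by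
  intro repo_name _
  unfold Spec_derive_module_path
  simp only [derive_module_path, derive_module_path_alt, splitOn_single, replace_single]
  generalize replaceFirst "PrismQ.".toList [] repo_name.toList = mfn
  rcases h : split1 '.' mfn with _ | ⟨p, ps⟩
  · exact absurd h (split1_ne_nil _ _)
  have hmain := main_path mfn
  rw [h] at hmain
  rcases ps with _ | ⟨q, qs⟩
  · -- single component: components[0] is module_full_name itself
    have hp : p = mfn := split1_singleton '.' mfn p h
    subst hp
    simp only [List.length_cons, List.length_nil, List.headD_cons]
    have : "src/".toList ++ p = "src/".toList ++ p.flatMap (fun c => if c = '.' then "/src/".toList else [c]) := by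
      simpa [intercalate_cons] using hmain
    rw [if_pos trivial, Prod.mk.injEq]
    exact ⟨rfl, by rw [← this]⟩
  · -- at least two components
    have hne : ¬ ((p :: q :: qs).length = 1) := by simp
    simp only [hne, if_false, List.tail_cons, List.headD_cons, PySem.Chars.join]
    rw [foldl_append_map]
    rw [Prod.mk.injEq]
    refine ⟨rfl, ?_⟩
    have : ['/'].intercalate (("src/".toList ++ p) :: (q :: qs).map (fun x => "src/".toList ++ x))
        = "src/".toList ++ mfn.flatMap (fun c => if c = '.' then "/src/".toList else [c]) := by
      simpa using hmain
    rw [← this]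
    simp
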